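-- pv_equiv track=rewrite | github.com/opensvc/opensvc | lib/svc.py | allocate_rid
-- ===== SOURCE A (Python) =====
-- def allocate_rid(group, sections):
--     """
--     Return an unused rid in <group>.
--     """
--     prefix = group + "#"
--     rids = [section for section in sections if section.startswith(prefix)]
--     idx = 1
--     while True:
--         rid = "#".join((group, str(idx)))
--         if rid in rids:
--             idx += 1
--             continue
--         return rid
-- ===== SOURCE B (Python) =====
-- def _parse_index(prefix, section):
--     """Return the index n >= 0 such that section == prefix + str(n), else None."""
--     if not section.startswith(prefix):
--         return None
--     suffix = section[len(prefix):]
--     if not suffix.isdigit():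
--         return None
--     if suffix != "0" and suffix.startswith("0"):
--         return None  # not a canonical index string like "01"
--     n = 0
--     for ch in suffix:
--         n = n * 10 + ord(ch) - ord("0")
--     return n
--
--
-- def allocate_rid(group, sections):
--     """
--     Return an unused rid in <group>.
--     """
--     prefix = group + "#"
--     used = set()
--     for section in sections:
--         n = _parse_index(prefix, section)
--         if n is not None:
--             used.add(n)
--     idx = 1
--     for n in sorted(used):
--         if n == idx:
--             idx += 1
--         elif n > idx:
--             break
--     return "#".join((group, str(idx)))
-- ===== Notes on version B (the rewrite author's own statement) =====
-- stated objective: alternative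
-- what changed: Instead of probing candidate rids one by one against the matching-section list, B parses each matching section's suffix once into an integer index (canonical decimal strings only), collects the used indices in a set, and finds the first free index by a single sweep over the sorted indices.
import Mathlib
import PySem

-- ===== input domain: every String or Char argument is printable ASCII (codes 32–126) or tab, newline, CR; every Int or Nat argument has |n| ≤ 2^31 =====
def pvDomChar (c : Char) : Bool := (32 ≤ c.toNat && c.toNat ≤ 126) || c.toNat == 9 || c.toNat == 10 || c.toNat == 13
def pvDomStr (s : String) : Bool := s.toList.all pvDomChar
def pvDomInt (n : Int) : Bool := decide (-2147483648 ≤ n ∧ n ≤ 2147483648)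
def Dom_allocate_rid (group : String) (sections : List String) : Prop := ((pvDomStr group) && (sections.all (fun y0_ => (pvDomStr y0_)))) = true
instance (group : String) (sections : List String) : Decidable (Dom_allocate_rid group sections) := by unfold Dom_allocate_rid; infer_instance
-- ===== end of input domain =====

-- B replaces A's candidate-by-candidate probing with a parse-once / sort / single-gap-sweep algorithm.

-- ===== PORT A =====
-- the 'while True' probe loop; fuel (rids.length + 1) only makes the same computation total
-- (proved sufficient below: some candidate in the window is unused)
def allocateRidProbe (group : String) (rids : List String) : Nat → Int → String
  | 0, idx => PySem.Str.join "#" [group, PySem.Int.toStr idx]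
  | fuel+1, idx =>
      let rid := PySem.Str.join "#" [group, PySem.Int.toStr idx]
      if rids.contains rid then allocateRidProbe group rids fuel (idx + 1) else rid

def allocate_rid (group : String) (sections : List String) : String :=
  let pfx := group ++ "#"
  let rids := sections.filter (fun sec => PySem.Str.startswith sec pfx)
  allocateRidProbe group rids (rids.length + 1) 1

-- ===== PORT B =====
-- _parse_index(prefix, section)
def allocateRidParse? (pfx : String) (sec : String) : Option Int :=
  if !(PySem.Str.startswith sec pfx) then none
  else
    let sfx := PySem.Str.slice sec (some (PySem.Str.len pfx)) none
    if !(PySem.Str.strIsdigit sfx) then none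
    else if (!(sfx == "0")) && PySem.Str.startswith sfx "0" then none
    else some (sfx.toList.foldl (fun n ch => n * 10 + (ch.toNat : Int) - 48) 0)

-- the 'for n in sorted(used)' loop with its break
def allocateRidSweep : List Int → Int → Int
  | [], idx => idx
  | n :: rest, idx =>
      if n = idx then allocateRidSweep rest (idx + 1)
      else if n > idx then idx
      else allocateRidSweep rest idx

def allocate_rid_alt (group : String) (sections : List String) : String :=
  let pfx := group ++ "#"
  let used : PySem.Set Int := sections.foldl (fun used sec =>
      match allocateRidParse? pfx sec with
      | some n => PySem.Set.add used n
      | none => used) PySem.Set.empty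
  let idx := allocateRidSweep (PySem.List.sorted used (fun n => n) false) 1
  PySem.Str.join "#" [group, PySem.Int.toStr idx]

-- ===== PRECONDITION & SPEC =====
def Spec_allocate_rid (group : String) (sections : List String) (out : String) : Prop := out = allocate_rid_alt group sections
instance (group : String) (sections : List String) (out : String) : Decidable (Spec_allocate_rid group sections out) := by unfold Spec_allocate_rid; infer_instance

-- ===== CLAIM (what is proved, stated in full; the proofs are below) =====
def Claim_equal_allocate_rid : Prop := ∀ (group : String) (sections : List String), Dom_allocate_rid group sections → Spec_allocate_rid group sections (allocate_rid group sections)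

-- ===== LEMMAS AND PROOFS =====

-- the numeric value of a decimal digit string (proof-side mirror of B's fold, over Nat)
def pvVal (s : List Char) : Nat := s.foldl (fun n c => n * 10 + (c.toNat - 48)) 0

-- the candidate rid string A probes
def pvRid (group : String) (j : Int) : String := PySem.Str.join "#" [group, PySem.Int.toStr j]

def pvDigits (s : List Char) : Prop := ∀ c ∈ s, PySem.Chars.isdigit c = true

theorem pv_str_ext {s t : String} (h : s.toList = t.toList) : s = t :=
  String.toList_inj.mp h

theorem pv_hash_toList : ("#" : String).toList = ['#'] := by decide

theorem pv_zero_toList : ("0" : String).toList = ['0'] := by decide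

theorem pv_startswith_iff {s p : List Char} : PySem.Chars.startswith s p = true ↔ p <+: s := by
  simp [PySem.Chars.startswith, List.isPrefixOf_iff_prefix]

theorem pv_char_eq_of_toNat {a b : Char} (h : a.toNat = b.toNat) : a = b := by
  apply Char.ext
  exact UInt32.toNat_inj.mp h

theorem pv_isdigit_eq (c : Char) : PySem.Chars.isdigit c = c.isDigit := rfl

theorem pv_toNat_bounds {c : Char} (hc : PySem.Chars.isdigit c = true) :
    48 ≤ c.toNat ∧ c.toNat ≤ 57 := by
  simp only [PySem.Chars.isdigit, Bool.and_eq_true, decide_eq_true_eq] at hc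
  obtain ⟨h1, h2⟩ := hc
  rw [Char.le_def] at h1 h2
  exact ⟨h1, h2⟩

theorem pv_digitChar_toNat {d : Nat} (hd : d < 10) : (Nat.digitChar d).toNat = d + 48 := by
  interval_cases d <;> rfl

theorem pv_digitChar_eq {c : Char} (hc : PySem.Chars.isdigit c = true) :
    Nat.digitChar (c.toNat - 48) = c := by
  obtain ⟨h1, h2⟩ := pv_toNat_bounds hc
  apply pv_char_eq_of_toNat
  rw [pv_digitChar_toNat (by omega)]
  omega

theorem pvVal_append (xs : List Char) (c : Char) :
    pvVal (xs ++ [c]) = pvVal xs * 10 + (c.toNat - 48) := by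
  simp [pvVal, List.foldl_append]

theorem pvVal_toDigits (m : Nat) : pvVal (Nat.toDigits 10 m) = m := by
  induction m using Nat.strong_induction_on with
  | _ m ih =>
    by_cases h : m < 10
    · rw [Nat.toDigits_of_lt_base h]
      have := pv_digitChar_toNat h
      simp [pvVal]
      omega
    · rw [Nat.toDigits_of_base_le (b := 10) (by norm_num) (by omega)]
      rw [pvVal_append, ih (m / 10) (by omega),
        pv_digitChar_toNat (Nat.mod_lt _ (by norm_num))]
      omega

theorem pv_toDigits_digits (m : Nat) : pvDigits (Nat.toDigits 10 m) := by
  intro c hc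
  rw [pv_isdigit_eq]
  exact Nat.isDigit_of_mem_toDigits (by norm_num) (by norm_num) hc

theorem pv_toDigits_ne_nil (m : Nat) : Nat.toDigits 10 m ≠ [] := by
  have := @Nat.length_toDigits_pos 10 m
  intro h
  simp [h] at this

theorem pv_toDigits_head_ne_zero : ∀ m : Nat, 1 ≤ m → (Nat.toDigits 10 m).head? ≠ some '0' := by
  intro m
  induction m using Nat.strong_induction_on with
  | _ m ih =>
    intro hm
    by_cases h : m < 10
    · rw [Nat.toDigits_of_lt_base h]
      interval_cases m <;> decide
    · rw [Nat.toDigits_of_base_le (b := 10) (by norm_num) (by omega)]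
      obtain ⟨a, t, hat⟩ := List.exists_cons_of_ne_nil (pv_toDigits_ne_nil (m / 10))
      have ha := ih (m / 10) (by omega) (by omega)
      rw [hat] at ha ⊢
      simpa using ha

theorem pvVal_foldl_ge (l : List Char) (acc : Nat) :
    acc ≤ l.foldl (fun n c => n * 10 + (c.toNat - 48)) acc := by
  induction l generalizing acc with
  | nil => simp
  | cons c t ih =>
    simp only [List.foldl_cons]
    calc acc ≤ acc * 10 + (c.toNat - 48) := by omega
    _ ≤ _ := ih _

theorem pvVal_pos {s : List Char} (hne : s ≠ []) (hd : pvDigits s)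
    (hz : s.head? ≠ some '0') : 1 ≤ pvVal s := by
  obtain ⟨c, t, rfl⟩ := List.exists_cons_of_ne_nil hne
  have hc : PySem.Chars.isdigit c = true := hd c (by simp)
  obtain ⟨h1, h2⟩ := pv_toNat_bounds hc
  have hc0 : c.toNat ≠ 48 := by
    intro h
    apply hz
    have : c = '0' := pv_char_eq_of_toNat (by simpa using h)
    simp [this]
  have : 1 ≤ 0 * 10 + (c.toNat - 48) := by omega
  calc 1 ≤ 0 * 10 + (c.toNat - 48) := this
  _ ≤ _ := pvVal_foldl_ge t _

theorem pv_toDigits_pvVal : ∀ s : List Char, s ≠ [] → pvDigits s →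
    s.head? ≠ some '0' → Nat.toDigits 10 (pvVal s) = s := by
  intro s
  induction s using List.reverseRecOn with
  | nil => intro h; cases h rfl
  | append_singleton xs c ih =>
    intro _ hd hz
    have hc : PySem.Chars.isdigit c = true := hd c (by simp)
    obtain ⟨h1, h2⟩ := pv_toNat_bounds hc
    by_cases hxs : xs = []
    · subst hxs
      simp only [List.nil_append] at hz ⊢
      rw [show pvVal [c] = c.toNat - 48 by simp [pvVal]]
      rw [Nat.toDigits_of_lt_base (by omega)]
      rw [pv_digitChar_eq hc]
    · obtain ⟨a, t, rfl⟩ := List.exists_cons_of_ne_nil hxs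
      have hdxs : pvDigits (a :: t) := fun x hx => hd x (List.mem_append_left _ hx)
      have hzxs : (a :: t).head? ≠ some '0' := by simpa using hz
      have hpos : 1 ≤ pvVal (a :: t) := pvVal_pos hxs hdxs hzxs
      rw [pvVal_append]
      rw [Nat.toDigits_of_base_le (b := 10) (by norm_num) (by omega)]
      have hdiv : (pvVal (a :: t) * 10 + (c.toNat - 48)) / 10 = pvVal (a :: t) := by omega
      have hmod : (pvVal (a :: t) * 10 + (c.toNat - 48)) % 10 = c.toNat - 48 := by omega
      rw [hdiv, hmod, ih hxs hdxs hzxs, pv_digitChar_eq hc]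

theorem pvValInt : ∀ (s : List Char), pvDigits s → ∀ (acc : Nat),
    s.foldl (fun n ch => n * 10 + (ch.toNat : Int) - 48) (acc : Int)
      = ((s.foldl (fun n c => n * 10 + (c.toNat - 48)) acc : Nat) : Int) := by
  intro s
  induction s with
  | nil => intro _ acc; simp
  | cons c t ih =>
    intro hd acc
    have hc := pv_toNat_bounds (hd c (by simp))
    have hdt : pvDigits t := fun x hx => hd x (by simp [hx])
    simp only [List.foldl_cons]
    have heq : (acc : Int) * 10 + (c.toNat : Int) - 48 = ((acc * 10 + (c.toNat - 48) : Nat) : Int) := by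
      omega
    rw [heq, ih hdt]

theorem pv_toChars_of_pos {j : Int} (hj : 1 ≤ j) :
    PySem.Int.toChars j = Nat.toDigits 10 j.toNat := by
  simp only [PySem.Int.toChars]
  rw [if_neg (by omega)]

theorem pvRid_toList (group : String) (j : Int) :
    (pvRid group j).toList = group.toList ++ '#' :: PySem.Int.toChars j := by
  simp [pvRid, PySem.Str.join, PySem.Chars.join, List.intercalate, List.intersperse,
    String.toList_ofList, pv_hash_toList, PySem.Int.toList_toStr]

theorem pv_pfx_toList (group : String) : (group ++ "#").toList = group.toList ++ ['#'] := by
  rw [String.toList_append, pv_hash_toList]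

-- characterization of B's parser at positive indices
theorem pvParse_some_iff (pfx sec : String) {j : Int} (hj : 1 ≤ j) :
    allocateRidParse? pfx sec = some j ↔ sec.toList = pfx.toList ++ PySem.Int.toChars j := by
  have htc : PySem.Int.toChars j = Nat.toDigits 10 j.toNat := pv_toChars_of_pos hj
  have hdig := pv_toDigits_digits j.toNat
  have hnn := pv_toDigits_ne_nil j.toNat
  have hhz := pv_toDigits_head_ne_zero j.toNat (by omega)
  unfold allocateRidParse?
  cases hsw : PySem.Str.startswith sec pfx with
  | false =>
    simp only [Bool.not_false, if_true]
    constructor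
    · intro h; cases h
    · intro h
      exfalso
      have hpre : pfx.toList <+: sec.toList := ⟨_, h.symm⟩
      have : PySem.Chars.startswith sec.toList pfx.toList = true :=
        pv_startswith_iff.mpr hpre
      rw [show PySem.Str.startswith sec pfx = PySem.Chars.startswith sec.toList pfx.toList from rfl] at hsw
      rw [this] at hsw; cases hsw
  | true =>
    simp only [Bool.not_true, Bool.false_eq_true, if_false]
    have hpre : pfx.toList <+: sec.toList := by
      have := hsw
      rw [show PySem.Str.startswith sec pfx = PySem.Chars.startswith sec.toList pfx.toList from rfl] at this
      exact pv_startswith_iff.mp this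
    obtain ⟨rest, hrest⟩ := hpre
    have hsfx : (PySem.Str.slice sec (some (PySem.Str.len pfx)) none).toList = rest := by
      rw [PySem.Str.toList_slice, PySem.Chars.slice_eq_listSlice]
      rw [show PySem.Str.len pfx = ((pfx.toList.length : Nat) : Int) from rfl]
      rw [PySem.List.slice_from_natCast]
      rw [← hrest, List.drop_left]
    set sfx := PySem.Str.slice sec (some (PySem.Str.len pfx)) none with hsfxdef
    have hiff : (sec.toList = pfx.toList ++ PySem.Int.toChars j) ↔ rest = PySem.Int.toChars j := by
      rw [← hrest]
      constructor
      · intro h; exact List.append_cancel_left h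
      · intro h; rw [h]
    rw [hiff]
    cases hdg : PySem.Str.strIsdigit sfx with
    | false =>
      simp only [Bool.not_false, if_true]
      constructor
      · intro h; cases h
      · intro h
        exfalso
        rw [PySem.Str.strIsdigit_eq, hsfx, h, htc] at hdg
        simp only [PySem.Chars.strIsdigit, Bool.and_eq_false_iff] at hdg
        rcases hdg with hdg | hdg
        · cases hE : (Nat.toDigits 10 j.toNat).isEmpty with
          | false => rw [hE] at hdg; cases hdg
          | true => exact hnn (List.isEmpty_iff.mp hE)
        · have hall : (Nat.toDigits 10 j.toNat).all PySem.Chars.isdigit = true :=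
            List.all_eq_true.mpr (fun x hx => hdig x hx)
          rw [hall] at hdg; cases hdg
    | true =>
      simp only [Bool.not_true, Bool.false_eq_true, if_false]
      have hdrest : pvDigits rest := by
        have hdg' := hdg
        rw [PySem.Str.strIsdigit_eq, hsfx] at hdg'
        simp only [PySem.Chars.strIsdigit, Bool.and_eq_true, List.all_eq_true] at hdg'
        exact hdg'.2
      have hrne : rest ≠ [] := by
        have hdg' := hdg
        rw [PySem.Str.strIsdigit_eq, hsfx] at hdg'
        simp only [PySem.Chars.strIsdigit, Bool.and_eq_true] at hdg'
        simpa using hdg'.1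
      cases hguard : (!(sfx == "0")) && PySem.Str.startswith sfx "0" with
      | true =>
        simp only [if_true]
        constructor
        · intro h; cases h
        · intro h
          exfalso
          simp only [Bool.and_eq_true, Bool.not_eq_true', beq_eq_false_iff_ne] at hguard
          obtain ⟨_, hsw0⟩ := hguard
          rw [show PySem.Str.startswith sfx "0" = PySem.Chars.startswith sfx.toList ("0" : String).toList from rfl] at hsw0
          rw [pv_zero_toList] at hsw0
          have h0 : ['0'] <+: rest := by
            rw [← hsfx]; exact pv_startswith_iff.mp hsw0
          obtain ⟨t2, ht2⟩ := h0
          rw [h, htc] at ht2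
          apply hhz
          rw [← ht2]
          rfl
      | false =>
        simp only [Bool.false_eq_true, if_false, Option.some_inj]
        rw [hsfx]
        rw [show (0 : Int) = ((0 : Nat) : Int) from rfl, pvValInt rest hdrest 0]
        have hfold : List.foldl (fun n c => n * 10 + (c.toNat - 48)) 0 rest = pvVal rest := rfl
        rw [hfold]
        constructor
        · intro h
          simp only [Bool.and_eq_false_iff] at hguard
          have hz0 : rest.head? ≠ some '0' := by
            rcases hguard with hguard | hguard
            · -- sfx == "0", i.e. rest = ['0']: value 0 contradicts 1 ≤ j
              exfalso
              cases hq : (sfx == "0") with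
              | false => rw [hq] at hguard; cases hguard
              | true =>
              have hr0 : rest = ['0'] := by
                rw [← hsfx, eq_of_beq hq, pv_zero_toList]
              rw [hr0] at h
              rw [show pvVal ['0'] = 0 from by decide] at h
              omega
            · intro hh
              obtain ⟨c0, t0, rfl⟩ := List.exists_cons_of_ne_nil hrne
              simp only [List.head?_cons, Option.some_inj] at hh
              subst hh
              rw [show PySem.Str.startswith sfx "0" = PySem.Chars.startswith sfx.toList ("0" : String).toList from rfl] at hguard
              rw [pv_zero_toList, hsfx] at hguard
              have : PySem.Chars.startswith ('0' :: t0) ['0'] = true :=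
                pv_startswith_iff.mpr ⟨t0, rfl⟩
              rw [this] at hguard
              cases hguard
          have hval : pvVal rest = j.toNat := by omega
          rw [htc, ← hval]
          exact (pv_toDigits_pvVal rest hrne hdrest hz0).symm
        · intro h
          rw [h, htc, pvVal_toDigits]
          omega

-- the used-set fold is the set of parsed values
theorem pvUsed_fold (pfx : String) : ∀ (l : List String) (s0 : PySem.Set Int),
    l.foldl (fun used sec =>
      match allocateRidParse? pfx sec with
      | some n => PySem.Set.add used n
      | none => used) s0
    = (l.filterMap (allocateRidParse? pfx)).foldl PySem.Set.add s0 := by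
  intro l
  induction l with
  | nil => intro s0; simp
  | cons a t ih =>
    intro s0
    simp only [List.foldl_cons, List.filterMap_cons]
    cases hp : allocateRidParse? pfx a with
    | none => simp only [hp]; exact ih s0
    | some n => simp only [hp, List.foldl_cons]; exact ih _

theorem pvUsed_eq (pfx : String) (sections : List String) :
    sections.foldl (fun used sec =>
      match allocateRidParse? pfx sec with
      | some n => PySem.Set.add used n
      | none => used) PySem.Set.empty
    = PySem.Set.ofList (sections.filterMap (allocateRidParse? pfx)) := by
  rw [pvUsed_fold, PySem.Set.ofList_eq_foldl]
  rfl

-- bridge: candidate j is a parsed index (B) iff it is a section A's probe can hit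
theorem pvBridge (group : String) (sections : List String) {j : Int} (hj : 1 ≤ j) :
    (j ∈ sections.filterMap (allocateRidParse? (group ++ "#")) ↔
      (sections.filter (fun sec => PySem.Str.startswith sec (group ++ "#"))).contains (pvRid group j) = true) := by
  have hridl : (pvRid group j).toList = (group ++ "#").toList ++ PySem.Int.toChars j := by
    rw [pvRid_toList, pv_pfx_toList]
    simp
  constructor
  · intro h
    rw [List.mem_filterMap] at h
    obtain ⟨sec, hsec, hp⟩ := h
    have hsecl := (pvParse_some_iff _ _ hj).mp hp
    have hseceq : sec = pvRid group j := pv_str_ext (by rw [hsecl, hridl])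
    rw [List.contains_eq_mem, decide_eq_true_eq, List.mem_filter]
    refine ⟨by rw [← hseceq]; exact hsec, ?_⟩
    rw [show PySem.Str.startswith (pvRid group j) (group ++ "#")
        = PySem.Chars.startswith (pvRid group j).toList (group ++ "#").toList from rfl]
    exact pv_startswith_iff.mpr ⟨_, hridl.symm⟩
  · intro h
    rw [List.contains_eq_mem, decide_eq_true_eq, List.mem_filter] at h
    rw [List.mem_filterMap]
    exact ⟨pvRid group j, h.1, (pvParse_some_iff _ _ hj).mpr hridl⟩

-- rid is injective at positive indices
theorem pvRid_inj {group : String} {a b : Int} (ha : 1 ≤ a) (hb : 1 ≤ b)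
    (h : pvRid group a = pvRid group b) : a = b := by
  have hl : (pvRid group a).toList = (pvRid group b).toList := by rw [h]
  rw [pvRid_toList, pvRid_toList] at hl
  have hc : PySem.Int.toChars a = PySem.Int.toChars b := by
    have := List.append_cancel_left hl
    simpa using this
  rw [pv_toChars_of_pos ha, pv_toChars_of_pos hb] at hc
  have : a.toNat = b.toNat := by
    rw [← pvVal_toDigits a.toNat, ← pvVal_toDigits b.toNat, hc]
  omega

-- A's probe loop returns the first unused candidate, given one exists in the fuel window
theorem pvProbe_spec (group : String) (rids : List String) :
    ∀ (fuel : Nat) (idx : Int),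
      (∃ j : Int, idx ≤ j ∧ j < idx + fuel ∧ rids.contains (pvRid group j) = false) →
      ∃ m : Int, allocateRidProbe group rids fuel idx = pvRid group m ∧
        idx ≤ m ∧ rids.contains (pvRid group m) = false ∧
        ∀ j : Int, idx ≤ j → j < m → rids.contains (pvRid group j) = true := by
  intro fuel
  induction fuel with
  | zero =>
    intro idx h
    obtain ⟨j, h1, h2, _⟩ := h
    exfalso
    simp only [Nat.cast_zero, add_zero] at h2
    omega
  | succ fuel ih =>
    intro idx hex
    show ∃ m, (let rid := PySem.Str.join "#" [group, PySem.Int.toStr idx];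
      if rids.contains rid then allocateRidProbe group rids fuel (idx + 1) else rid) = pvRid group m ∧ _
    simp only
    cases hc : rids.contains (PySem.Str.join "#" [group, PySem.Int.toStr idx]) with
    | false =>
      refine ⟨idx, by simp [hc, pvRid], le_refl _, by simpa [pvRid] using hc, ?_⟩
      intro k hk1 hk2; omega
    | true =>
      obtain ⟨j, h1, h2, h3⟩ := hex
      have hji : j ≠ idx := by
        intro he; rw [he] at h3
        rw [show pvRid group idx = PySem.Str.join "#" [group, PySem.Int.toStr idx] from rfl] at h3
        rw [hc] at h3; cases h3
      have hex' : ∃ j : Int, idx + 1 ≤ j ∧ j < idx + 1 + fuel ∧ rids.contains (pvRid group j) = false := by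
        refine ⟨j, by omega, by push_cast at h2 ⊢; omega, h3⟩
      obtain ⟨m, hm1, hm2, hm3, hm4⟩ := ih (idx + 1) hex'
      refine ⟨m, by simpa [hc] using hm1, by omega, hm3, ?_⟩
      intro k hk1 hk2
      by_cases hke : k = idx
      · rw [hke]
        rw [show pvRid group idx = PySem.Str.join "#" [group, PySem.Int.toStr idx] from rfl]
        exact hc
      · exact hm4 k (by omega) hk2

-- pigeonhole: some candidate index in [1, rids.length + 2) is unused
theorem pvProbe_exists (group : String) (rids : List String) :
    ∃ j : Int, 1 ≤ j ∧ j < 1 + ((rids.length : Int) + 1) ∧ rids.contains (pvRid group j) = false := by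
  by_contra h
  push_neg at h
  have hall : ∀ j : Int, 1 ≤ j → j < 1 + ((rids.length : Int) + 1) →
      rids.contains (pvRid group j) = true := by
    intro j h1 h2
    have := h j h1 h2
    simpa using this
  set L := (List.range (rids.length + 1)).map (fun i : Nat => pvRid group (1 + (i : Int))) with hL
  have hnd : L.Nodup := by
    apply List.Nodup.map_on
    · intro x _ y _ hxy
      have := pvRid_inj (group := group) (a := 1 + (x : Int)) (b := 1 + (y : Int))
        (by omega) (by omega) hxy
      omega
    · exact List.nodup_range
  have hsub : L ⊆ rids := by
    intro x hx
    rw [hL, List.mem_map] at hx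
    obtain ⟨i, hi, rfl⟩ := hx
    rw [List.mem_range] at hi
    have := hall (1 + (i : Int)) (by omega) (by push_cast; omega)
    rw [List.contains_eq_mem, decide_eq_true_eq] at this
    exact this
  have hle := (hnd.subperm hsub).length_le
  simp only [hL, List.length_map, List.length_range] at hle
  omega

-- B's sweep over a strictly increasing list returns the first gap at or after idx
theorem pvSweep_spec : ∀ (l : List Int), l.Pairwise (· < ·) → ∀ (idx : Int),
    idx ≤ allocateRidSweep l idx ∧ allocateRidSweep l idx ∉ l ∧
      ∀ j : Int, idx ≤ j → j < allocateRidSweep l idx → j ∈ l := by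
  intro l
  induction l with
  | nil =>
    intro _ idx
    simp only [allocateRidSweep]
    exact ⟨le_refl _, by simp, fun j h1 h2 => by omega⟩
  | cons n rest ih =>
    intro hp idx
    rw [List.pairwise_cons] at hp
    obtain ⟨hall, hp'⟩ := hp
    simp only [allocateRidSweep]
    by_cases he : n = idx
    · rw [if_pos he]
      obtain ⟨h1, h2, h3⟩ := ih hp' (idx + 1)
      refine ⟨by omega, ?_, ?_⟩
      · simp only [List.mem_cons, not_or]
        exact ⟨by omega, h2⟩
      · intro j hj1 hj2
        by_cases hje : j = idx
        · rw [hje, ← he]; simp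
        · exact List.mem_cons_of_mem _ (h3 j (by omega) hj2)
    · rw [if_neg he]
      by_cases hg : n > idx
      · rw [if_pos hg]
        refine ⟨le_refl _, ?_, fun j h1 h2 => by omega⟩
        simp only [List.mem_cons, not_or]
        exact ⟨by omega, fun hmem => by have := hall _ hmem; omega⟩
      · rw [if_neg hg]
        obtain ⟨h1, h2, h3⟩ := ih hp' idx
        refine ⟨h1, ?_, ?_⟩
        · simp only [List.mem_cons, not_or]
          exact ⟨by omega, h2⟩
        · intro j hj1 hj2
          exact List.mem_cons_of_mem _ (h3 j hj1 hj2)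

theorem pv_main (group : String) (sections : List String) :
    allocate_rid group sections = allocate_rid_alt group sections := by
  unfold allocate_rid allocate_rid_alt
  simp only []
  set pfx := group ++ "#" with hpfx
  set rids := sections.filter (fun sec => PySem.Str.startswith sec pfx) with hrids
  set vals := sections.filterMap (allocateRidParse? pfx) with hvals
  have hused : sections.foldl (fun used sec =>
      match allocateRidParse? pfx sec with
      | some n => PySem.Set.add used n
      | none => used) PySem.Set.empty = PySem.Set.ofList vals := pvUsed_eq pfx sections
  rw [hused]
  set l := PySem.List.sorted (PySem.Set.ofList vals) (fun n => n) false with hl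
  have hpw : l.Pairwise (· < ·) := PySem.List.sorted_ofList_pairwise_lt vals
  have hmeml : ∀ x : Int, x ∈ l ↔ x ∈ vals := by
    intro x
    rw [hl, PySem.List.mem_sorted, PySem.Set.mem_ofList]
  obtain ⟨hb1, hb2, hb3⟩ := pvSweep_spec l hpw 1
  set mB := allocateRidSweep l 1 with hmB
  obtain ⟨mA, ha0, ha1, ha2, ha3⟩ := pvProbe_spec group rids (rids.length + 1) 1
    (by
      obtain ⟨j, h1, h2, h3⟩ := pvProbe_exists group rids
      exact ⟨j, h1, by push_cast at h2 ⊢; omega, h3⟩)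
  rw [ha0]
  have hbr : ∀ j : Int, 1 ≤ j → (rids.contains (pvRid group j) = true ↔ j ∈ l) := by
    intro j hj
    rw [hmeml, hvals, hrids, hpfx]
    exact (pvBridge group sections hj).symm
  have hAB : mA = mB := by
    by_contra hne
    rcases lt_or_gt_of_ne hne with hlt | hgt
    · have hmem : mA ∈ l := hb3 mA ha1 hlt
      have := (hbr mA ha1).mpr hmem
      rw [ha2] at this; cases this
    · have := ha3 mB hb1 hgt
      exact hb2 ((hbr mB hb1).mp this)
  rw [hAB]
  rfl

-- ===== VERDICT (by name: the statement is the Claim_ definition above) =====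
theorem allocate_rid_spec : Claim_equal_allocate_rid := by
  intro group sections _
  show allocate_rid group sections = allocate_rid_alt group sections
  exact pv_main group sections
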